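-- pv_equiv track=rewrite | github.com/Nicolas77777777/Python | Lezione7/esercizi_funzioni.py | roscio1
-- ===== SOURCE A (Python) =====
-- from collections import defaultdict
--
-- def roscio1 (l: list):
--
--     diz = defaultdict(int)
--
--     for i in range(0, len(l)): # cicla sugli indici di una lista [1,1,3,4,3,6,7,6,8]
--
--         if i == 0: # se lelemnto i è 0 fai questo :
--             if l[i] != l[i+1]: # se l che è 0 è diverso da l'elemnto sucessivo
--                 diz[l[i]]= diz[l[i]]+1 # crea il dizionario con l'elemnto 0
--         elif i == (len(l)-1):
--             if l[i] != l[i-1]: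
--                 diz[l[i]]= diz[l[i]]+1
--         else:
--             if l[i] != l[i-1] and l[i] != l[i+1]:
--                 diz[l[i]]= diz[l[i]]+1
--
--     return diz
-- ===== SOURCE B (Python) =====
-- from collections import defaultdict
--
-- def roscio1(l: list):
--     # Run-length encode the list, then count the value of every run of length 1:
--     # an element differs from all its neighbours exactly when it forms a run of its own.
--     runs = []
--     i, n = 0, len(l)
--     while i < n:
--         j = i + 1
--         while j < n and l[j] == l[i]:
--             j += 1
--         runs.append((l[i], j - i))
--         i = j
--     diz = defaultdict(int)
--     for v, c in runs:
--         if c == 1: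
--             diz[v] += 1
--     return diz
-- ===== Notes on version B (the rewrite author's own statement) =====
-- stated objective: alternative
-- what changed: B run-length encodes the list (outer loop jumping run by run, inner loop finding each run's end) and then counts the value of every run of length 1, instead of A's single index loop with three-branch neighbour comparisons at every position.
-- crash fix: On single-element lists A raises IndexError (it reads l[i+1] at i == 0) while B returns {l[0]: 1}, the lone element being a run of its own. — e.g. on roscio1([5]): A raises IndexError, B returns [(5, 1)]
import Mathlib
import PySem

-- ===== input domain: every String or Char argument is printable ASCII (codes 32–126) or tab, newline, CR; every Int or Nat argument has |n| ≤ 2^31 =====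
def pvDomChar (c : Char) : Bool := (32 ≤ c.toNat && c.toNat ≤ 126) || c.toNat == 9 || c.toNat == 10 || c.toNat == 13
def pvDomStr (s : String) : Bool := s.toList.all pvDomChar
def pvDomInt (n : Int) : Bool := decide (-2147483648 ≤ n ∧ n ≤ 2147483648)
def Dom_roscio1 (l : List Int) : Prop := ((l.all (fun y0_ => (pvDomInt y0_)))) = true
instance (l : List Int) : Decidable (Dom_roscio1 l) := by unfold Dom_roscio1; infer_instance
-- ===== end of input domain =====

-- B is a different algorithm: it run-length encodes the list and counts the value of each
-- run of length 1 (an element differs from all neighbours iff it is a run of its own),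
-- instead of A's per-index three-branch neighbour comparisons (alternative, same O(n)).

-- ===== PORT A =====
def roscio1 (l : List Int) : List (Int × Int) :=
  let diz : PySem.Dict Int Int :=
    (PySem.List.pyRange 0 (l.length : Int) 1).foldl (fun diz i =>
      if i == 0 then
        if PySem.List.pyGetD l i 0 != PySem.List.pyGetD l (i+1) 0 then
          diz.insert (PySem.List.pyGetD l i 0) (diz.getD (PySem.List.pyGetD l i 0) 0 + 1)
        else diz
      else if i == (l.length : Int) - 1 then
        if PySem.List.pyGetD l i 0 != PySem.List.pyGetD l (i-1) 0 then
          diz.insert (PySem.List.pyGetD l i 0) (diz.getD (PySem.List.pyGetD l i 0) 0 + 1)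
        else diz
      else
        if PySem.List.pyGetD l i 0 != PySem.List.pyGetD l (i-1) 0
            && PySem.List.pyGetD l i 0 != PySem.List.pyGetD l (i+1) 0 then
          diz.insert (PySem.List.pyGetD l i 0) (diz.getD (PySem.List.pyGetD l i 0) 0 + 1)
        else diz) PySem.Dict.empty
  diz.items

-- ===== PORT B =====
-- inner while loop of Source B: number of leading elements of the tail equal to x
def pvRunLen (x : Int) : List Int → Nat
  | [] => 0
  | y :: t => if y == x then pvRunLen x t + 1 else 0

-- outer while loop of Source B: the run-length encoding [(value, run length), …]
-- (the first argument is plain fuel — one unit per loop iteration — so that the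
-- recursion is structural; pvRuns passes enough fuel for the whole list)
def pvRunsF : Nat → List Int → List (Int × Int)
  | _, [] => []
  | 0, _ :: _ => []
  | n + 1, x :: rest => (x, (pvRunLen x rest : Int) + 1) :: pvRunsF n (rest.drop (pvRunLen x rest))

def pvRuns (l : List Int) : List (Int × Int) := pvRunsF l.length l

def roscio1_alt (l : List Int) : List (Int × Int) :=
  let runs := pvRuns l
  let diz : PySem.Dict Int Int :=
    runs.foldl (fun diz vc =>
      if vc.2 == 1 then diz.insert vc.1 (diz.getD vc.1 0 + 1) else diz) PySem.Dict.empty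
  diz.items

-- ===== PRECONDITION & SPEC =====
-- Pre_ excludes exactly the singleton list, on which A raises IndexError (l[i+1] at i = 0).
def Pre_roscio1 (l : List Int) : Prop := l.length ≠ 1
instance (l : List Int) : Decidable (Pre_roscio1 l) := by unfold Pre_roscio1; infer_instance
def pvWitness_roscio1 : List Int := [1, 1, 3, 4, 3]

-- On singleton lists A raises IndexError while B returns {x: 1} (a lone element has no equal neighbour).
def Raises_roscio1 (l : List Int) : Prop := l.length = 1
instance (l : List Int) : Decidable (Raises_roscio1 l) := by unfold Raises_roscio1; infer_instance
def pvRaiseWitness_roscio1 : List Int := [5]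
def pvRaiseWitnessOut_roscio1 : List (Int × Int) := [(5, 1)]

def Spec_roscio1 (l : List Int) (out : List (Int × Int)) : Prop := out = roscio1_alt l
instance (l : List Int) (out : List (Int × Int)) : Decidable (Spec_roscio1 l out) := by unfold Spec_roscio1; infer_instance

-- ===== CLAIM (what is proved, stated in full; the proofs are below) =====
def Claim_equal_roscio1 : Prop := ∀ (l : List Int), Dom_roscio1 l → Pre_roscio1 l → Spec_roscio1 l (roscio1 l)
def Claim_raises_roscio1 : Prop := (∀ (l : List Int), Dom_roscio1 l → Raises_roscio1 l → ¬ Pre_roscio1 l) ∧ (Dom_roscio1 (pvRaiseWitness_roscio1) ∧ Raises_roscio1 (pvRaiseWitness_roscio1) ∧ roscio1_alt (pvRaiseWitness_roscio1) = pvRaiseWitnessOut_roscio1)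

-- ===== LEMMAS AND PROOFS =====

-- the shared dictionary update: diz[v] = diz[v] + 1
def pvStep (d : PySem.Dict Int Int) (v : Int) : PySem.Dict Int Int :=
  d.insert v (d.getD v 0 + 1)

-- "differs from the (optional) left neighbour"
def pvDiffb (prev : Option Int) (x : Int) : Bool :=
  match prev with
  | none => true
  | some p => p != x

-- specification: the values (in order) of the positions that differ from all neighbours,
-- given the element immediately to the left (none = no left neighbour)
def pvSelW (prev : Option Int) : List Int → List Int
  | [] => []
  | [x] => if pvDiffb prev x then [x] else []
  | x :: y :: t => (if pvDiffb prev x && x != y then [x] else []) ++ pvSelW (some x) (y :: t)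

-- A's combined qualification condition at index i
def pvCondA (l : List Int) (i : Int) : Bool :=
  if i == 0 then PySem.List.pyGetD l i 0 != PySem.List.pyGetD l (i+1) 0
  else if i == (l.length : Int) - 1 then PySem.List.pyGetD l i 0 != PySem.List.pyGetD l (i-1) 0
  else PySem.List.pyGetD l i 0 != PySem.List.pyGetD l (i-1) 0
        && PySem.List.pyGetD l i 0 != PySem.List.pyGetD l (i+1) 0

-- the same condition in Nat indexing relative to a left context
def pvCondN (prev : Option Int) (m : List Int) (k : Nat) : Bool :=
  (if k = 0 then pvDiffb prev (m.getD 0 0) else (m.getD (k-1) 0 != m.getD k 0)) &&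
  (if k + 1 = m.length then true else (m.getD k 0 != m.getD (k+1) 0))

theorem foldl_sel {α : Type} (xs : List α) (c : α → Bool) (g : α → Int) (d : PySem.Dict Int Int) :
    xs.foldl (fun d a => if c a then d.insert (g a) (d.getD (g a) 0 + 1) else d) d
      = (xs.filterMap (fun a => if c a then some (g a) else none)).foldl pvStep d := by
  induction xs generalizing d with
  | nil => rfl
  | cons x t ih =>
    by_cases h : c x = true <;> simp [List.foldl_cons, h, ih, pvStep]

theorem filterMap_congr' {a b : Type} (l : List a) {f g : a -> Option b}
    (h : forall x, x ∈ l -> f x = g x) : l.filterMap f = l.filterMap g := by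
  induction l with
  | nil => rfl
  | cons x t ih =>
    simp only [List.filterMap_cons, h x (List.mem_cons_self ..),
      ih (fun y hy => h y (List.mem_cons_of_mem _ hy))]

theorem runlen_take (x : Int) (rest : List Int) :
    rest.take (pvRunLen x rest) = List.replicate (pvRunLen x rest) x := by
  induction rest with
  | nil => rfl
  | cons y t ih =>
    by_cases h : y = x
    · subst h; simp [pvRunLen, List.replicate_succ, ih]
    · simp [pvRunLen, h]

theorem runlen_decomp (x : Int) (rest : List Int) :
    rest = List.replicate (pvRunLen x rest) x ++ rest.drop (pvRunLen x rest) := by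
  conv_lhs => rw [← List.take_append_drop (pvRunLen x rest) rest]
  rw [runlen_take]

theorem runlen_head (x : Int) (rest : List Int) :
    ∀ y, (rest.drop (pvRunLen x rest)).head? = some y → y ≠ x := by
  induction rest with
  | nil => intro y h; simp at h
  | cons z t ih =>
    intro y h
    by_cases hz : z = x
    · rw [hz] at h
      rw [show pvRunLen x (x :: t) = pvRunLen x t + 1 from by simp [pvRunLen],
        List.drop_succ_cons] at h
      exact ih y h
    · rw [show pvRunLen x (z :: t) = 0 from by simp [pvRunLen, hz], List.drop_zero,
        List.head?_cons, Option.some.injEq] at h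
      rw [← h]; exact hz

theorem selW_cons_same (x : Int) (r : List Int) :
    pvSelW (some x) (x :: r) = pvSelW (some x) r := by
  cases r with
  | nil => simp [pvSelW, pvDiffb]
  | cons y t => simp [pvSelW, pvDiffb]

theorem selW_replicate (k : Nat) (x : Int) (t : List Int) :
    pvSelW (some x) (List.replicate k x ++ t) = pvSelW (some x) t := by
  induction k with
  | zero => rfl
  | succ j ih => rw [List.replicate_succ, List.cons_append, selW_cons_same, ih]

theorem selB_eq : ∀ (n : Nat) (m : List Int) (prev : Option Int), m.length ≤ n →
    (∀ p, prev = some p → ∀ y, m.head? = some y → y ≠ p) →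
    (pvRunsF n m).filterMap (fun vc => if vc.2 == 1 then some vc.1 else none) = pvSelW prev m := by
  intro n
  induction n with
  | zero =>
    intro m prev hm _
    have hme : m = [] := List.eq_nil_of_length_eq_zero (Nat.le_zero.mp hm)
    subst hme
    simp [pvRunsF, pvSelW]
  | succ n ih =>
    intro m prev hm hprev
    cases m with
    | nil => simp [pvRunsF, pvSelW]
    | cons x rest =>
      have hdiff : pvDiffb prev x = true := by
        cases prev with
        | none => rfl
        | some p =>
          have hpx := hprev p rfl x rfl
          simp only [pvDiffb, bne_iff_ne, ne_eq]
          exact fun h => hpx h.symm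
      have hruns : pvRunsF (n + 1) (x :: rest)
          = (x, (pvRunLen x rest : Int) + 1) :: pvRunsF n (rest.drop (pvRunLen x rest)) := rfl
      have hhead := runlen_head x rest
      have hlen' : (rest.drop (pvRunLen x rest)).length ≤ n := by
        have h1 : (rest.drop (pvRunLen x rest)).length = rest.length - pvRunLen x rest := by
          simp
        have h2 : rest.length + 1 ≤ n + 1 := by simpa using hm
        omega
      have hrec : (pvRunsF n (rest.drop (pvRunLen x rest))).filterMap
            (fun vc => if vc.2 == 1 then some vc.1 else none)
          = pvSelW (some x) (rest.drop (pvRunLen x rest)) :=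
        ih _ (some x) hlen' (by intro p hp y hy; cases hp; exact hhead y hy)
      have hdec := runlen_decomp x rest
      rw [hruns, List.filterMap_cons]
      cases hk : pvRunLen x rest with
      | zero =>
        rw [hk] at hrec
        rw [List.drop_zero] at hrec
        simp only [Nat.cast_zero, zero_add, beq_self_eq_true, if_pos]
        cases hr : rest with
        | nil =>
          simp [pvRunsF, pvSelW, hdiff]
        | cons y t =>
          have hyx : y ≠ x := by
            apply hhead
            rw [hk, List.drop_zero, hr]; rfl
          rw [hr] at hrec
          have hbne : (x != y) = true := by
            simp only [bne_iff_ne, ne_eq]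
            exact fun h => hyx h.symm
          simp only [List.drop_zero] at hrec ⊢
          simp [pvSelW, hdiff, hbne]
          simpa using hrec
      | succ j =>
        rw [hk] at hrec hdec
        have hfalse : ((((j + 1 : Nat)) : Int) + 1 == 1) = false := by
          simp only [beq_eq_false_iff_ne, ne_eq]
          push_cast
          omega
        rw [hfalse]
        rw [show pvSelW prev (x :: rest) = pvSelW (some x) (rest.drop (j + 1)) from by
          conv_lhs => rw [hdec, List.replicate_succ, List.cons_append]
          rw [show pvSelW prev (x :: x :: (List.replicate j x ++ rest.drop (j + 1)))
              = (if pvDiffb prev x && x != x then [x] else [])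
                ++ pvSelW (some x) (x :: (List.replicate j x ++ rest.drop (j + 1))) from rfl]
          rw [selW_cons_same, selW_replicate]
          simp]
        exact hrec

theorem selR : ∀ (m : List Int) (prev : Option Int), m ≠ [] →
    (List.range m.length).filterMap (fun k => if pvCondN prev m k then some (m.getD k 0) else none)
      = pvSelW prev m := by
  intro m
  induction m with
  | nil => intro _ h; exact absurd rfl h
  | cons x m' ih =>
    intro prev _
    cases m' with
    | nil =>
      cases h : pvDiffb prev x <;> simp [List.range_succ, pvCondN, pvSelW, h]
    | cons y t =>
      rw [show (x :: y :: t).length = (y :: t).length + 1 from rfl, List.range_succ_eq_map,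
        List.filterMap_cons, List.filterMap_map]
      have htail : ∀ k, k ∈ List.range (y :: t).length →
          ((fun k => if pvCondN prev (x :: y :: t) k
            then some ((x :: y :: t).getD k 0) else none) ∘ Nat.succ) k
          = (fun k => if pvCondN (some x) (y :: t) k then some ((y :: t).getD k 0) else none) k := by
        intro k _
        have hcond : pvCondN prev (x :: y :: t) (k + 1) = pvCondN (some x) (y :: t) k := by
          cases k with
          | zero => simp [pvCondN, pvDiffb]
          | succ j => simp [pvCondN]
        simp only [Function.comp, Nat.succ_eq_add_one, hcond, List.getD_cons_succ]
      rw [filterMap_congr' _ htail, ih (some x) (by simp)]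
      have hhead : pvCondN prev (x :: y :: t) 0 = (pvDiffb prev x && x != y) := by
        simp [pvCondN]
      rw [hhead]
      cases h : (pvDiffb prev x && x != y) <;> simp [pvSelW, h]

theorem condA_eq_condN (l : List Int) (hl : 2 ≤ l.length) (k : Nat) (hk : k < l.length) :
    pvCondA l (k : Int) = pvCondN none l k := by
  have hcast1 : ((k : Int) + 1) = ((k + 1 : Nat) : Int) := by push_cast; ring
  by_cases h0 : k = 0
  · subst h0
    simp only [pvCondA, pvCondN, pvDiffb, Nat.cast_zero]
    rw [if_pos (by simp)]
    rw [show (0:Int) + 1 = ((1:Nat):Int) from by norm_num, PySem.List.pyGetD_natCast]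
    simp [PySem.List.pyGetD_zero, show ¬(0 + 1 = l.length) from by omega]
  · have hkz : ((k : Int) == 0) = false := by simp; omega
    have hcast2 : ((k : Int) - 1) = ((k - 1 : Nat) : Int) := by omega
    by_cases hlast : k = l.length - 1
    · have hl' : ((k : Int) == (l.length : Int) - 1) = true := by simp; omega
      simp only [pvCondA, hkz, hl', pvCondN, if_neg h0, hcast2,
        PySem.List.pyGetD_natCast, Bool.if_false_left, if_true]
      simp [show k + 1 = l.length from by omega, bne_comm]
    · have hlast' : ((k : Int) == (l.length : Int) - 1) = false := by simp; omega
      simp only [pvCondA, hkz, hlast', pvCondN, if_neg h0, hcast1, hcast2,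
        PySem.List.pyGetD_natCast, Bool.false_eq_true, if_false]
      simp [show ¬(k + 1 = l.length) from by omega, bne_comm, Bool.and_comm]

theorem stepA_eq (l : List Int) (diz : PySem.Dict Int Int) (i : Int) :
    (if i == 0 then
        if PySem.List.pyGetD l i 0 != PySem.List.pyGetD l (i+1) 0 then
          diz.insert (PySem.List.pyGetD l i 0) (diz.getD (PySem.List.pyGetD l i 0) 0 + 1)
        else diz
      else if i == (l.length : Int) - 1 then
        if PySem.List.pyGetD l i 0 != PySem.List.pyGetD l (i-1) 0 then
          diz.insert (PySem.List.pyGetD l i 0) (diz.getD (PySem.List.pyGetD l i 0) 0 + 1)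
        else diz
      else
        if PySem.List.pyGetD l i 0 != PySem.List.pyGetD l (i-1) 0
            && PySem.List.pyGetD l i 0 != PySem.List.pyGetD l (i+1) 0 then
          diz.insert (PySem.List.pyGetD l i 0) (diz.getD (PySem.List.pyGetD l i 0) 0 + 1)
        else diz)
    = (if pvCondA l i then
        diz.insert (PySem.List.pyGetD l i 0) (diz.getD (PySem.List.pyGetD l i 0) 0 + 1)
      else diz) := by
  unfold pvCondA
  by_cases h0 : (i == 0) = true <;> by_cases h1 : (i == (l.length : Int) - 1) = true <;>
    simp [h0, h1]

theorem A_eq (l : List Int) (h : l.length ≠ 1) :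
    roscio1 l = ((pvSelW none l).foldl pvStep PySem.Dict.empty).items := by
  unfold roscio1
  dsimp only
  rw [PySem.List.foldl_congr_mem _ _
    (fun diz i => if pvCondA l i then
        diz.insert (PySem.List.pyGetD l i 0) (diz.getD (PySem.List.pyGetD l i 0) 0 + 1)
      else diz)
    _ (by intro acc i _; exact stepA_eq l acc i)]
  rw [foldl_sel _ (fun i => pvCondA l i) (fun i => PySem.List.pyGetD l i 0)]
  congr 1
  cases hl : l with
  | nil => simp [pvSelW]
  | cons x m =>
    rw [← hl]
    have hpos : 1 ≤ l.length := by rw [hl]; simp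
    have hl2 : 2 ≤ l.length := by omega
    rw [PySem.List.pyRange_one, List.filterMap_map]
    rw [show ((l.length : Int) - 0).toNat = l.length from by omega]
    rw [filterMap_congr' _ (g := fun k => if pvCondN none l k then some (l.getD k 0) else none)
      (by
        intro k hk
        rw [List.mem_range] at hk
        simp only [Function.comp, Int.zero_add]
        rw [condA_eq_condN l hl2 k hk, PySem.List.pyGetD_natCast])]
    rw [selR l none (by rw [hl]; simp)]

theorem B_eq (l : List Int) :
    roscio1_alt l = ((pvSelW none l).foldl pvStep PySem.Dict.empty).items := by
  unfold roscio1_alt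
  dsimp only
  rw [foldl_sel (pvRuns l) (fun vc => vc.2 == 1) (fun vc => vc.1)]
  unfold pvRuns
  rw [selB_eq l.length l none le_rfl (by intro p hp; cases hp)]

-- ===== VERDICT (by name: the statement is the Claim_ definition above) =====
theorem roscio1_spec : Claim_equal_roscio1 := by
  intro l _ hpre
  unfold Spec_roscio1
  rw [A_eq l hpre, B_eq l]

@[simp] theorem roscio1_raises : Claim_raises_roscio1 := by
  unfold Claim_raises_roscio1
  exact ⟨by intro l _ h hp; exact hp h, by decide⟩
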